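-- pv_equiv track=rewrite | github.com/nvxraM/Honours | 7. combine_filter_gapped_cds.py | process_gene_sequences
-- ===== SOURCE A (Python) =====
-- def process_gene_sequences(gene_sequences):
--     """
--     Given a dictionary of gene sequences {accession: seq_string}, apply the following steps:
--     1. Remove trailing gaps ('-') from all sequences.
--     2. Determine the shortest sequence length across all sequences and truncate all to that length.
--     3. Ensure the final length is divisible by 3. If not, trim off extra nucleotides at the end.
--     4. Identify any codon positions (every 3 nucleotides) that contain 'N' in any sequence. Remove
--        those codons from all sequences.
--     5. After removing codons with 'N', ensure all sequences remain the same length and are aligned.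
--
--     Returns:
--         dict: {accession: processed_sequence_str}
--     """
--     if not gene_sequences:
--         return gene_sequences
--
--     # Step 1: Remove trailing gaps
--     # Using rstrip('-') to remove any trailing '-' characters
--     for acc in gene_sequences:
--         gene_sequences[acc] = gene_sequences[acc].rstrip('-')
--
--     # Step 2: Truncate all sequences to the shortest length
--     min_length = min(len(seq) for seq in gene_sequences.values())
--     for acc in gene_sequences:
--         gene_sequences[acc] = gene_sequences[acc][:min_length]
--
--     # Step 3: Ensure length is divisible by 3
--     remainder = min_length % 3
--     if remainder != 0:
--         min_length -= remainder
--         for acc in gene_sequences: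
--             gene_sequences[acc] = gene_sequences[acc][:min_length]
--
--     # If no sequence length remains, just return empty sequences
--     if min_length == 0:
--         return {acc: "" for acc in gene_sequences}
--
--     # Step 4: Remove codons containing 'N'
--     # We have min_length which is divisible by 3 now
--     num_codons = min_length // 3
--
--     # Create a mask that indicates which codon positions are retained
--     codon_mask = [True] * num_codons
--
--     # Check each codon position in all sequences
--     for i in range(num_codons):
--         start = i * 3
--         end = start + 3
--         # If any sequence at this codon position has 'N', mark codon as False
--         for seq in gene_sequences.values():
--             if 'N' in seq[start:end]:
--                 codon_mask[i] = False
--                 break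
--
--     # Build new sequences excluding codons with 'N'
--     for acc in gene_sequences:
--         seq = gene_sequences[acc]
--         new_seq_parts = [seq[i*3:(i*3)+3] for i in range(num_codons) if codon_mask[i]]
--         gene_sequences[acc] = "".join(new_seq_parts)
--
--     # After removing codons, ensure all sequences align at the same length again
--     if gene_sequences:
--         final_min_length = min(len(s) for s in gene_sequences.values())
--         for acc in gene_sequences:
--             gene_sequences[acc] = gene_sequences[acc][:final_min_length]
--
--     return gene_sequences
-- ===== SOURCE B (Python) =====
-- def process_gene_sequences(gene_sequences):
--     # One pass per sequence: collect bad codon indices into a set, then rebuild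
--     # each sequence from the kept codon slices (same return value as the
--     # column-major mask version; mutates the dict in place like the original).
--     if not gene_sequences:
--         return gene_sequences
--     for acc in gene_sequences:
--         gene_sequences[acc] = gene_sequences[acc].rstrip('-')
--     min_length = min(len(seq) for seq in gene_sequences.values())
--     min_length -= min_length % 3
--     if min_length == 0:
--         return {acc: "" for acc in gene_sequences}
--     bad = set()
--     for seq in gene_sequences.values():
--         for pos, ch in enumerate(seq[:min_length]):
--             if ch == 'N':
--                 bad.add(pos // 3)
--     kept = [i for i in range(min_length // 3) if i not in bad]
--     for acc in gene_sequences: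
--         seq = gene_sequences[acc]
--         gene_sequences[acc] = "".join(seq[i*3:i*3+3] for i in kept)
--     return gene_sequences
-- ===== Notes on version B (the rewrite author's own statement) =====
-- stated objective: simpler
-- what changed: Replaces the column-major codon mask (for each codon index, scan every sequence's slice) by a single row-major pass over each sequence that collects bad codon indices pos//3 into a set, drops the intermediate per-sequence truncations, and rebuilds from the kept indices, making the final realignment truncation unnecessary.
import Mathlib
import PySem

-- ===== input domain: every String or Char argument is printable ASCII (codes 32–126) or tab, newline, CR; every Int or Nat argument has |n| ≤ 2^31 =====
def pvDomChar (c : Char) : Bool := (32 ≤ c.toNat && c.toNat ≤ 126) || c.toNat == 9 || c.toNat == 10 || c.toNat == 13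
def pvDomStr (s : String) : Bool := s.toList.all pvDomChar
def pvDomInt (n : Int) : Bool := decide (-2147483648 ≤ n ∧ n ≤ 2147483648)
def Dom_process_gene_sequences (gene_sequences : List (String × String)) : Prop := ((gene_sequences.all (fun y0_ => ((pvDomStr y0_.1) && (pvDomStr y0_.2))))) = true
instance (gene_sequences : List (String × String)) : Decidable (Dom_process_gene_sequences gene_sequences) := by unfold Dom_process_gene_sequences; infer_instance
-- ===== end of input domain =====

-- B replaces A's column-major codon mask by one row-major pass per sequence collecting bad
-- codon indices into a set (objective: simpler). Both Pythons mutate the input dict in place;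
-- the equivalence proved here is about the RETURN value.

-- ===== PORT A =====
-- s.rstrip('-') : exact hand port (drop trailing '-' characters)
def pvRstripDash (cs : List Char) : List Char := (cs.reverse.dropWhile (fun c => c = '-')).reverse

-- min(len(seq) for seq in d.values()) over a NONEMPTY dict (Python's min of the lengths)
def pvMinValLen (gs : List (String × List Char)) : Nat :=
  match gs with
  | [] => 0
  | p :: t => t.foldl (fun m q => min m q.2.length) p.2.length

def process_gene_sequences (gene_sequences : List (String × String)) : List (String × String) :=
  if gene_sequences = [] then gene_sequences
  else
    -- Step 1: remove trailing gaps
    let g1 := gene_sequences.map (fun p => (p.1, pvRstripDash p.2.toList))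
    -- Step 2: truncate to the shortest length (seq[:min_length] = take, nonneg bound)
    let minLength0 := pvMinValLen g1
    let g2 := g1.map (fun p => (p.1, p.2.take minLength0))
    -- Step 3: make the length divisible by 3
    let remainder := minLength0 % 3
    let minLength := if remainder ≠ 0 then minLength0 - remainder else minLength0
    let g3 := if remainder ≠ 0 then g2.map (fun p => (p.1, p.2.take minLength)) else g2
    if minLength = 0 then gene_sequences.map (fun p => (p.1, ""))
    else
      -- Step 4: column-major codon mask ('N' in seq[i*3:i*3+3] — slice = take 3 ∘ drop (i*3), exact for nonneg bounds)
      let numCodons := minLength / 3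
      let codonMask := (List.range numCodons).map
        (fun i => !(g3.any (fun p => PySem.Chars.isIn ['N'] ((p.2.drop (i*3)).take 3))))
      -- rebuild sequences from the retained codons ("".join)
      let g4 := g3.map (fun p => (p.1,
        PySem.Chars.join [] (((List.range numCodons).filter (fun i => codonMask.getD i false)).map
          (fun i => (p.2.drop (i*3)).take 3))))
      -- final realignment truncation
      let finalMin := pvMinValLen g4
      g4.map (fun p => (p.1, String.ofList (p.2.take finalMin)))

-- ===== PORT B =====
def process_gene_sequences_alt (gene_sequences : List (String × String)) : List (String × String) :=
  if gene_sequences = [] then gene_sequences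
  else
    let g1 := gene_sequences.map (fun p => (p.1, pvRstripDash p.2.toList))
    let m0 := pvMinValLen g1
    let m := m0 - m0 % 3
    if m = 0 then gene_sequences.map (fun p => (p.1, ""))
    else
      -- one pass per sequence: every 'N' position pos in seq[:m] marks codon pos // 3 as bad
      let bad : PySem.Set Int := g1.foldl
        (fun s p => (PySem.List.enumerate (p.2.take m)).foldl
          (fun s pc => if pc.2 = 'N' then s.add (PySem.Int.floordiv pc.1 3) else s) s)
        PySem.Set.empty
      let kept := (List.range (m / 3)).filter (fun i => !(bad.contains (Int.ofNat i)))
      g1.map (fun p => (p.1, String.ofList (List.flatten (kept.map (fun i => (p.2.drop (i*3)).take 3)))))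

-- ===== PRECONDITION & SPEC =====
def Spec_process_gene_sequences (gene_sequences : List (String × String)) (out : List (String × String)) : Prop := out = process_gene_sequences_alt gene_sequences
instance (gene_sequences : List (String × String)) (out : List (String × String)) : Decidable (Spec_process_gene_sequences gene_sequences out) := by unfold Spec_process_gene_sequences; infer_instance

-- ===== CLAIM (what is proved, stated in full; the proofs are below) =====
def Claim_equal_process_gene_sequences : Prop := ∀ (gene_sequences : List (String × String)), Dom_process_gene_sequences gene_sequences → Spec_process_gene_sequences gene_sequences (process_gene_sequences gene_sequences)

-- ===== LEMMAS AND PROOFS =====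

theorem pv_join_nil_eq_flatten (ps : List (List Char)) :
    PySem.Chars.join [] ps = ps.flatten := by
  simp [PySem.Chars.join, List.intercalate]
  induction ps with
  | nil => simp
  | cons a t ih => cases t <;> simp_all [List.intersperse]

theorem pv_foldl_min_le_init (t : List (String × List Char)) (a : Nat) :
    t.foldl (fun m q => min m q.2.length) a ≤ a := by
  induction t generalizing a with
  | nil => simp
  | cons h tl ih => exact le_trans (ih _) (by simp)

theorem pv_foldl_min_le_mem (t : List (String × List Char)) (a : Nat)
    (p : String × List Char) (hp : p ∈ t) :
    t.foldl (fun m q => min m q.2.length) a ≤ p.2.length := by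
  induction t generalizing a with
  | nil => simp at hp
  | cons h tl ih =>
    rcases List.mem_cons.mp hp with h' | h'
    · subst h'; exact le_trans (pv_foldl_min_le_init tl _) (by simp)
    · exact ih _ h'

theorem pv_minValLen_le (l : List (String × List Char)) (p : String × List Char)
    (hp : p ∈ l) : pvMinValLen l ≤ p.2.length := by
  match l, hp with
  | q :: t, hp =>
    rcases List.mem_cons.mp hp with h | h
    · subst h; exact pv_foldl_min_le_init t _
    · exact pv_foldl_min_le_mem t _ p h

theorem pv_foldl_min_const (t : List (String × List Char)) (L : Nat)
    (h : ∀ p ∈ t, p.2.length = L) :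
    t.foldl (fun m q => min m q.2.length) L = L := by
  induction t with
  | nil => rfl
  | cons h2 tl ih =>
    have e := h h2 (by simp)
    simp only [List.foldl_cons, e, min_self]
    exact ih (fun p hp => h p (by simp [hp]))

theorem pv_minValLen_const (l : List (String × List Char)) (L : Nat)
    (h : ∀ p ∈ l, p.2.length = L) (hne : l ≠ []) : pvMinValLen l = L := by
  match l with
  | q :: t =>
    show t.foldl (fun m q => min m q.2.length) q.2.length = L
    rw [h q (by simp)]
    exact pv_foldl_min_const t L (fun p hp => h p (by simp [hp]))

theorem pv_floordiv_natCast_three (k : Nat) :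
    PySem.Int.floordiv (k : Int) 3 = ((k / 3 : Nat) : Int) := by
  rw [PySem.Int.floordiv.eq_def, Int.fdiv_eq_ediv]
  · omega

theorem pv_mem_inner_fold (L : List (Int × Char)) (s0 : PySem.Set Int) (x : Int) :
    (x ∈ L.foldl (fun s pc => if pc.2 = 'N' then s.add (PySem.Int.floordiv pc.1 3) else s) s0) ↔
      x ∈ s0 ∨ ∃ pc ∈ L, pc.2 = 'N' ∧ PySem.Int.floordiv pc.1 3 = x := by
  induction L generalizing s0 with
  | nil => simp
  | cons pc t ih =>
    simp only [List.foldl_cons, ih, List.mem_cons]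
    by_cases h : pc.2 = 'N'
    · simp only [h]
      aesop
    · simp only [if_neg h]
      aesop

theorem pv_mem_bad (m : Nat) (l : List (String × List Char)) (s0 : PySem.Set Int) (x : Int) :
    (x ∈ l.foldl
        (fun s p => (PySem.List.enumerate (p.2.take m)).foldl
          (fun s pc => if pc.2 = 'N' then s.add (PySem.Int.floordiv pc.1 3) else s) s) s0) ↔
      x ∈ s0 ∨ ∃ p ∈ l, ∃ pc ∈ PySem.List.enumerate (p.2.take m), pc.2 = 'N' ∧ PySem.Int.floordiv pc.1 3 = x := by
  induction l generalizing s0 with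
  | nil => simp
  | cons p t ih =>
    simp only [List.foldl_cons, ih, pv_mem_inner_fold, List.mem_cons]
    aesop

theorem pv_isIn_singleton (c : Char) (s : List Char) :
    PySem.Chars.isIn [c] s = true ↔ c ∈ s := by
  rw [PySem.Chars.isIn_iff_infix]
  constructor
  · intro h
    exact List.singleton_sublist.mp h.sublist
  · intro h
    rcases List.mem_iff_append.mp h with ⟨s1, s2, rfl⟩
    exact ⟨s1, s2, by simp⟩

theorem pv_mem_slice_iff (w : List Char) (i : Nat) :
    ('N' ∈ (w.drop (i*3)).take 3) ↔ ∃ k, ∃ _ : k < w.length, w[k] = 'N' ∧ k / 3 = i := by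
  rw [List.mem_iff_getElem]
  constructor
  · rintro ⟨j, hj, he⟩
    have hlen := hj
    simp only [List.length_take, List.length_drop] at hlen
    have hj3 : j < 3 := lt_of_lt_of_le hlen (min_le_left _ _)
    refine ⟨i*3 + j, ?_, ?_, by omega⟩
    · omega
    · rw [← he, List.getElem_take, List.getElem_drop]
  · rintro ⟨k, hk, hN, hki⟩
    refine ⟨k - i*3, ?_, ?_⟩
    · simp only [List.length_take, List.length_drop]; omega
    · rw [List.getElem_take, List.getElem_drop]
      convert hN using 2
      omega

theorem pv_mask_getD (num : Nat) (f : Nat → Bool) (i : Nat) (hi : i < num) :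
    ((List.range num).map f).getD i false = f i := by
  rw [List.getD_eq_getElem?_getD, List.getElem?_map, List.getElem?_range hi]
  rfl

theorem pv_slice_take (v : List Char) (m i : Nat) (h : i*3 + 3 ≤ m) :
    ((v.take m).drop (i*3)).take 3 = (v.drop (i*3)).take 3 := by
  rw [List.drop_take, List.take_take]
  congr 1
  omega

-- the core equality, phrased over g1 directly to keep the term small
theorem pv_core (gs : List (String × String)) (g1 : List (String × List Char))
    (hg1 : g1 = gs.map (fun p => (p.1, pvRstripDash p.2.toList))) (hne : gs ≠ []) :
    process_gene_sequences gs = process_gene_sequences_alt gs := by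
  have hg1ne : g1 ≠ [] := by simp [hg1, hne]
  unfold process_gene_sequences process_gene_sequences_alt
  simp only [if_neg hne, ← hg1]
  set m0 := pvMinValLen g1 with hm0
  have hmin : (if m0 % 3 ≠ 0 then m0 - m0 % 3 else m0) = m0 - m0 % 3 := by
    split <;> omega
  rw [hmin]
  set m := m0 - m0 % 3 with hm
  have hg3 : (if m0 % 3 ≠ 0 then (g1.map (fun p => (p.1, p.2.take m0))).map (fun p => (p.1, p.2.take m)) else g1.map (fun p => (p.1, p.2.take m0)))
      = g1.map (fun p => (p.1, p.2.take m)) := by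
    split
    · rw [List.map_map]
      apply List.map_congr_left
      intro p _
      simp only [Function.comp, List.take_take]
      congr 2
      omega
    · apply List.map_congr_left
      intro p _
      have : m = m0 := by omega
      rw [this]
  rw [hg3]
  by_cases hm0' : m = 0
  · simp [hm0']
  · simp only [if_neg hm0']
    set G := g1.map (fun p => (p.1, List.take m p.2)) with hG
    set bad := g1.foldl
        (fun s p => (PySem.List.enumerate (p.2.take m)).foldl
          (fun s pc => if pc.2 = 'N' then s.add (PySem.Int.floordiv pc.1 3) else s) s)
        PySem.Set.empty with hbad
    set kept := (List.range (m / 3)).filter (fun i => !(bad.contains (Int.ofNat i))) with hkeptdef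
    have hfilter : List.filter (fun i => ((List.range (m/3)).map (fun i => !(G.any (fun p => PySem.Chars.isIn ['N'] ((p.2.drop (i*3)).take 3))))).getD i false) (List.range (m/3)) = kept := by
      rw [hkeptdef]
      apply List.filter_congr
      intro i hi
      have hilt : i < m/3 := List.mem_range.mp hi
      rw [pv_mask_getD _ _ _ hilt]
      congr 1
      rw [Bool.eq_iff_iff, PySem.Set.contains_iff, hbad, pv_mem_bad]
      simp only [PySem.Set.empty_eq, List.not_mem_nil, false_or]
      simp only [Int.ofNat_eq_natCast]
      rw [hG, List.any_map, List.any_eq_true]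
      apply exists_congr; intro p
      apply and_congr_right; intro hp
      simp only [Function.comp]
      rw [pv_isIn_singleton, pv_mem_slice_iff]
      simp only [PySem.List.mem_enumerate_iff]
      constructor
      · rintro ⟨k, hk, hN, hki⟩
        exact ⟨(0 + (k:Int), (p.2.take m)[k]), ⟨k, hk, rfl⟩, hN, by
          simp only [zero_add, pv_floordiv_natCast_three, hki]⟩
      · rintro ⟨pc, ⟨k, hk, rfl⟩, hN, hfd⟩
        refine ⟨k, hk, hN, ?_⟩
        rw [zero_add, pv_floordiv_natCast_three] at hfd
        exact_mod_cast hfd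
    rw [hfilter]
    have hg4 : G.map (fun p => (p.1, PySem.Chars.join [] (kept.map (fun i => (p.2.drop (i*3)).take 3))))
        = g1.map (fun p => (p.1, List.flatten (kept.map (fun i => (p.2.drop (i*3)).take 3)))) := by
      rw [hG, List.map_map]
      apply List.map_congr_left
      intro p _
      simp only [Function.comp]
      rw [pv_join_nil_eq_flatten]
      congr 1
      congr 1
      apply List.map_congr_left
      intro i hi
      have hir : i < m/3 := List.mem_range.mp (List.mem_of_mem_filter hi)
      exact pv_slice_take p.2 m i (by omega)
    rw [hg4]
    have hlenval : ∀ p ∈ g1.map (fun p => (p.1, List.flatten (kept.map (fun i => (p.2.drop (i*3)).take 3)))), p.2.length = 3 * kept.length := by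
      intro p hp
      rcases List.mem_map.mp hp with ⟨q, hq, rfl⟩
      simp only [List.length_flatten, List.map_map]
      have hql : m ≤ q.2.length := le_trans (by omega) (pv_minValLen_le g1 q hq)
      have : List.map (List.length ∘ fun i => (q.2.drop (i*3)).take 3) kept = List.map (fun _ => 3) kept := by
        apply List.map_congr_left
        intro i hi
        have hir : i < m/3 := List.mem_range.mp (List.mem_of_mem_filter hi)
        simp only [Function.comp, List.length_take, List.length_drop]
        omega
      rw [this, List.map_const', List.sum_replicate, smul_eq_mul, Nat.mul_comm]
    have hg1mapne : g1.map (fun p => (p.1, List.flatten (kept.map (fun i => (p.2.drop (i*3)).take 3)))) ≠ [] := by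
      simp [hg1ne]
    rw [pv_minValLen_const _ _ hlenval hg1mapne, List.map_map]
    apply List.map_congr_left
    intro p hp
    simp only [Function.comp]
    rw [List.take_of_length_le]
    exact le_of_eq (hlenval _ (List.mem_map_of_mem hp))

theorem pv_AB_eq (gs : List (String × String)) :
    process_gene_sequences gs = process_gene_sequences_alt gs := by
  by_cases h : gs = []
  · subst h
    rfl
  · exact pv_core gs _ rfl h

-- ===== VERDICT (by name: the statement is the Claim_ definition above) =====
theorem process_gene_sequences_spec : Claim_equal_process_gene_sequences := by
  intro gs _
  unfold Spec_process_gene_sequences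
  exact pv_AB_eq gs
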